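-- pv_equiv track=rewrite | github.com/Nemantor/abitur_calc | main.py | endnote
-- ===== SOURCE A (Python) =====
-- lessons = {0: 'En', 1: 'Mat', 2: 'Deu', 3: 'Phy', 4: 'Bio', 5: 'Chemie'}
--
-- def endnote(rounded_avg, selection):
--     sum = 0
--
--     for val in rounded_avg[0:3]:
--         sum += val * 2
--
--     for i, val in enumerate(rounded_avg[3:], start=3):
--         if lessons[i] == selection['sch_abi']:
--             sum += val * 2
--         else:
--             sum += val
--
--     return sum
-- ===== SOURCE B (Python) =====
-- lessons = {0: 'En', 1: 'Mat', 2: 'Deu', 3: 'Phy', 4: 'Bio', 5: 'Chemie'}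
--
-- _subject_index = {name: i for i, name in lessons.items()}
--
-- def endnote(rounded_avg, selection):
--     # staged aggregate: first three count double, the rest once
--     total = 2 * sum(rounded_avg[:3]) + sum(rounded_avg[3:])
--     # the chosen sch_abi subject (looked up O(1) in a reverse index) earns one extra copy
--     idx = _subject_index.get(selection.get('sch_abi'), -1)
--     if 3 <= idx < len(rounded_avg):
--         total += rounded_avg[idx]
--     return total
-- ===== Notes on version B (the rewrite author's own statement) =====
-- stated objective: alternative
-- what changed: B replaces A's element-wise conditional loops by two aggregate sums (first three doubled, tail once) plus a single O(1) reverse-index lookup of the chosen sch_abi subject to add its grade once more; Pre_ excludes the inputs where A raises KeyError (more than 6 grades, or a tail grade with no 'sch_abi' key).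
import Mathlib
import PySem

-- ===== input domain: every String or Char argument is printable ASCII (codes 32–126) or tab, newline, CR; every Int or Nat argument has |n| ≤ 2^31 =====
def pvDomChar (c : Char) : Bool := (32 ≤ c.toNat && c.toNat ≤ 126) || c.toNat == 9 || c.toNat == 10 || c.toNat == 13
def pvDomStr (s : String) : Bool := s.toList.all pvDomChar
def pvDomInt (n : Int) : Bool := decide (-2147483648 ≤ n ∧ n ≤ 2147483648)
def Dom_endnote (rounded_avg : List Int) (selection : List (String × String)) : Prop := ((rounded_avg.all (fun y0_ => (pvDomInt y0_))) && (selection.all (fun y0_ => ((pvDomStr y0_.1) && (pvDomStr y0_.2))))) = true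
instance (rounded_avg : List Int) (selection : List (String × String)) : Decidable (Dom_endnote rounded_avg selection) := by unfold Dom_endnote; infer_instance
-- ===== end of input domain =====

-- B computes staged aggregate sums (first three doubled, tail once) and adds the chosen
-- sch_abi subject's grade once more via a reverse subject→index lookup, instead of A's
-- element-wise conditional loops (objective: alternative).


-- ===== PORT A =====
-- module-level constant `lessons`
def lessonsDict : PySem.Dict Int String :=
  PySem.Dict.ofList [(0, "En"), (1, "Mat"), (2, "Deu"), (3, "Phy"), (4, "Bio"), (5, "Chemie")]

-- lessons[i] / selection['sch_abi']: Python raises KeyError where get? is none;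
-- those inputs are outside Pre_endnote, so the `getD ""` default is never reached there.
def endnote (rounded_avg : List Int) (selection : List (String × String)) : Int :=
  let s0 : Int :=
    (PySem.List.slice rounded_avg (some 0) (some 3)).foldl (fun s val => s + val * 2) 0
  (PySem.List.enumerate (PySem.List.slice rounded_avg (some 3) none) 3).foldl
    (fun s iv =>
      if (lessonsDict.get? iv.1).getD "" ==
         ((PySem.Dict.ofList selection).get? "sch_abi").getD "" then
        s + iv.2 * 2
      else
        s + iv.2) s0

-- ===== PORT B =====
-- module-level constant `_subject_index = {name: i for i, name in lessons.items()}`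
def subjectIndex : PySem.Dict String Int :=
  PySem.Dict.ofList [("En", 0), ("Mat", 1), ("Deu", 2), ("Phy", 3), ("Bio", 4), ("Chemie", 5)]

def endnote_alt (rounded_avg : List Int) (selection : List (String × String)) : Int :=
  let total : Int :=
    2 * (PySem.List.slice rounded_avg none (some 3)).sum
      + (PySem.List.slice rounded_avg (some 3) none).sum
  -- _subject_index.get(selection.get('sch_abi'), -1): a None key never matches the
  -- string-keyed dict, so it yields the default -1 — ported exactly as this match
  let idx : Int :=
    match (PySem.Dict.ofList selection).get? "sch_abi" with
    | none => -1
    | some s => (subjectIndex.get? s).getD (-1)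
  if 3 ≤ idx ∧ idx < (rounded_avg.length : Int) then
    total + PySem.List.pyGetD rounded_avg idx 0   -- guard keeps idx in range (exact)
  else
    total

-- ===== PRECONDITION & SPEC =====
-- Pre_ excludes exactly the inputs where Python A raises KeyError: more than 6 grades
-- (lessons has keys 0..5), or a tail grade present while selection lacks the 'sch_abi' key.
def Pre_endnote (rounded_avg : List Int) (selection : List (String × String)) : Prop :=
  rounded_avg.length ≤ 6 ∧
    (rounded_avg.length ≤ 3 ∨ (selection.any (fun p => p.1 == "sch_abi")) = true)
instance (rounded_avg : List Int) (selection : List (String × String)) : Decidable (Pre_endnote rounded_avg selection) := by unfold Pre_endnote; infer_instance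

def pvWitness_endnote : List Int × (List (String × String)) :=
  ([12, 10, 9, 11, 7], [("sch_abi", "Phy")])

def Spec_endnote (rounded_avg : List Int) (selection : List (String × String)) (out : Int) : Prop := out = endnote_alt rounded_avg selection
instance (rounded_avg : List Int) (selection : List (String × String)) (out : Int) : Decidable (Spec_endnote rounded_avg selection out) := by unfold Spec_endnote; infer_instance

-- ===== CLAIM (what is proved, stated in full; the proofs are below) =====
def Claim_equal_endnote : Prop := ∀ (rounded_avg : List Int) (selection : List (String × String)), Dom_endnote rounded_avg selection → Pre_endnote rounded_avg selection → Spec_endnote rounded_avg selection (endnote rounded_avg selection)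

-- ===== LEMMAS AND PROOFS =====

-- the selection key exists, so 'sch_abi' lookup returns some value
theorem sel_get_some (selection : List (String × String))
    (h : (selection.any (fun p => p.1 == "sch_abi")) = true) :
    ∃ s, (PySem.Dict.ofList selection).get? "sch_abi" = some s := by
  have hmem : "sch_abi" ∈ selection.map Prod.fst := by
    simp only [List.any_eq_true, beq_iff_eq] at h
    obtain ⟨p, hp, he⟩ := h
    exact List.mem_map.mpr ⟨p, hp, he⟩
  have hk := PySem.Dict.keys_foldl_insert_key selection Prod.fst (fun _ p => p.2) PySem.Dict.empty
  have hc : (PySem.Dict.ofList selection).contains "sch_abi" = true := by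
    rw [PySem.Dict.contains_iff_mem_keys]
    show "sch_abi" ∈ (List.foldl (fun d x => d.insert (Prod.fst x) ((fun _ p => p.2) d x)) PySem.Dict.empty selection).keys
    rw [hk, PySem.Set.mem_update]
    exact Or.inr hmem
  rw [PySem.Dict.contains_eq_isSome_get?] at hc
  exact Option.isSome_iff_exists.mp hc

-- a subject other than the three tail subjects has reverse index < 3 (so no bonus)
theorem rev_lt (s : String) (h1 : s ≠ "Phy") (h2 : s ≠ "Bio") (h3 : s ≠ "Chemie") :
    ((subjectIndex.get? s).getD (-1)) < 3 := by
  have h : subjectIndex.get? s = (PySem.Dict.mk [("En", (0:Int)), ("Mat", 1), ("Deu", 2), ("Phy", 3), ("Bio", 4), ("Chemie", 5)]).get? s := rfl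
  rw [h]
  simp only [PySem.Dict.get?_mk_cons]
  split_ifs <;> simp_all [PySem.Dict.get?]

theorem endnote_spec_aux (rounded_avg : List Int) (selection : List (String × String))
    (hpre : Pre_endnote rounded_avg selection) :
    endnote rounded_avg selection = endnote_alt rounded_avg selection := by
  obtain ⟨hlen6, hdisj⟩ := hpre
  have rP : (subjectIndex.get? "Phy").getD (-1) = (3 : Int) := rfl
  have rB : (subjectIndex.get? "Bio").getD (-1) = (4 : Int) := rfl
  have rC : (subjectIndex.get? "Chemie").getD (-1) = (5 : Int) := rfl
  have l3 : (lessonsDict.get? 3).getD "" = "Phy" := rfl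
  have l4 : (lessonsDict.get? 4).getD "" = "Bio" := rfl
  have l5 : (lessonsDict.get? 5).getD "" = "Chemie" := rfl
  rcases rounded_avg with _ | ⟨a, _ | ⟨b, _ | ⟨c, _ | ⟨d, _ | ⟨e, _ | ⟨f, rest⟩⟩⟩⟩⟩⟩
  case nil | cons.nil | cons.cons.nil | cons.cons.cons.nil =>
    -- at most three grades: A's tail loop is empty, B's bonus guard cannot fire
    rcases hv : (PySem.Dict.ofList selection).get? "sch_abi" with _ | s <;>
      simp [endnote, endnote_alt, hv, PySem.List.slice, PySem.List.clampIdx,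
            PySem.List.enumerate] <;>
      first
      | ring1
      | (intros; exfalso; omega)
      | (split_ifs with hg <;> first | ring1 | (exfalso; omega))
  -- four to six grades: Pre_ forces the 'sch_abi' key to exist; case on the chosen subject
  case cons.cons.cons.cons.nil =>
    have hany : (selection.any (fun p => p.1 == "sch_abi")) = true := by
      rcases hdisj with h | h
      · exact absurd h (by simp)
      · exact h
    obtain ⟨s, hs⟩ := sel_get_some selection hany
    by_cases hP : s = "Phy"
    · subst hP
      simp [endnote, endnote_alt, hs, rP, l3, l4, l5, PySem.List.slice, PySem.List.clampIdx,
            PySem.List.enumerate, PySem.List.pyGetD, PySem.List.pyGet?, PySem.List.pyIdx?] <;> ring1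
    · by_cases hB : s = "Bio"
      · subst hB
        simp [endnote, endnote_alt, hs, rB, l3, l4, l5, PySem.List.slice, PySem.List.clampIdx,
              PySem.List.enumerate, PySem.List.pyGetD, PySem.List.pyGet?, PySem.List.pyIdx?] <;> ring1
      · by_cases hC : s = "Chemie"
        · subst hC
          simp [endnote, endnote_alt, hs, rC, l3, l4, l5, PySem.List.slice, PySem.List.clampIdx,
                PySem.List.enumerate, PySem.List.pyGetD, PySem.List.pyGet?, PySem.List.pyIdx?] <;> ring1
        · have hlt := rev_lt s hP hB hC
          simp [endnote, endnote_alt, hs, l3, l4, l5, Ne.symm hP, Ne.symm hB, Ne.symm hC,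
                PySem.List.slice, PySem.List.clampIdx, PySem.List.enumerate] <;>
            first
            | ring1
            | (intros; exfalso; omega)
            | (split_ifs with hg <;> first | ring1 | (exfalso; omega))
  case cons.cons.cons.cons.cons.nil =>
    have hany : (selection.any (fun p => p.1 == "sch_abi")) = true := by
      rcases hdisj with h | h
      · exact absurd h (by simp)
      · exact h
    obtain ⟨s, hs⟩ := sel_get_some selection hany
    by_cases hP : s = "Phy"
    · subst hP
      simp [endnote, endnote_alt, hs, rP, l3, l4, l5, PySem.List.slice, PySem.List.clampIdx,
            PySem.List.enumerate, PySem.List.pyGetD, PySem.List.pyGet?, PySem.List.pyIdx?] <;> ring1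
    · by_cases hB : s = "Bio"
      · subst hB
        simp [endnote, endnote_alt, hs, rB, l3, l4, l5, PySem.List.slice, PySem.List.clampIdx,
              PySem.List.enumerate, PySem.List.pyGetD, PySem.List.pyGet?, PySem.List.pyIdx?] <;> ring1
      · by_cases hC : s = "Chemie"
        · subst hC
          simp [endnote, endnote_alt, hs, rC, l3, l4, l5, PySem.List.slice, PySem.List.clampIdx,
                PySem.List.enumerate, PySem.List.pyGetD, PySem.List.pyGet?, PySem.List.pyIdx?] <;> ring1
        · have hlt := rev_lt s hP hB hC
          simp [endnote, endnote_alt, hs, l3, l4, l5, Ne.symm hP, Ne.symm hB, Ne.symm hC,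
                PySem.List.slice, PySem.List.clampIdx, PySem.List.enumerate] <;>
            first
            | ring1
            | (intros; exfalso; omega)
            | (split_ifs with hg <;> first | ring1 | (exfalso; omega))
  case cons.cons.cons.cons.cons.cons =>
    rcases rest with _ | ⟨g, rest'⟩
    · -- exactly six grades
      have hany : (selection.any (fun p => p.1 == "sch_abi")) = true := by
        rcases hdisj with h | h
        · exact absurd h (by simp)
        · exact h
      obtain ⟨s, hs⟩ := sel_get_some selection hany
      by_cases hP : s = "Phy"
      · subst hP
        simp [endnote, endnote_alt, hs, rP, l3, l4, l5, PySem.List.slice, PySem.List.clampIdx,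
              PySem.List.enumerate, PySem.List.pyGetD, PySem.List.pyGet?, PySem.List.pyIdx?] <;> ring1
      · by_cases hB : s = "Bio"
        · subst hB
          simp [endnote, endnote_alt, hs, rB, l3, l4, l5, PySem.List.slice, PySem.List.clampIdx,
                PySem.List.enumerate, PySem.List.pyGetD, PySem.List.pyGet?, PySem.List.pyIdx?] <;> ring1
        · by_cases hC : s = "Chemie"
          · subst hC
            simp [endnote, endnote_alt, hs, rC, l3, l4, l5, PySem.List.slice, PySem.List.clampIdx,
                  PySem.List.enumerate, PySem.List.pyGetD, PySem.List.pyGet?, PySem.List.pyIdx?] <;> ring1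
          · have hlt := rev_lt s hP hB hC
            simp [endnote, endnote_alt, hs, l3, l4, l5, Ne.symm hP, Ne.symm hB, Ne.symm hC,
                  PySem.List.slice, PySem.List.clampIdx, PySem.List.enumerate] <;>
              first
              | ring1
              | (intros; exfalso; omega)
              | (split_ifs with hg <;> first | ring1 | (exfalso; omega))
    · exfalso; simp at hlen6; omega

-- ===== VERDICT (by name: the statement is the Claim_ definition above) =====
theorem endnote_spec : Claim_equal_endnote := by
  intro rounded_avg selection _ hpre
  exact endnote_spec_aux rounded_avg selection hpre
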